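-- pv_equiv track=rewrite | github.com/MinwooJe/Algorithm | 프로그래머스/1/258712. 가장 많이 받은 선물/가장 많이 받은 선물.py | solution
-- ===== SOURCE A (Python) =====
-- def solution(friends, gifts):
--     length = len(friends)
--     table = [[0 for _ in range(len(friends))] for _ in range(length)]
--     name_dict = {name:idx for idx, name in enumerate(friends)}
--
--     # index_dict = {이름: [준 선물 개수, 받은 선물 개수]} => 선물지수 계산용
--     index_dict = {idx:[0, 0] for idx in range(length)}
--     gift_index = [0 for _ in range(length)]
--
--     next_month = [0 for _ in range(length)]
--
--     # 주고받은 선물의 개수를 표현하는 테이블 만들기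
--     for gift in gifts:
--         giver, taker = gift.split()
--         giver, taker = name_dict[giver], name_dict[taker]
--
--         table[giver][taker] += 1        # 테이블 게산
--
--         # 선물지수 계산하기 위한 딕셔너리 만들기
--         index_dict[giver][0] += 1
--         index_dict[taker][1] += 1
--
--     # 선물지수 리스트 계산
--     for i in range(length):
--         gift_index[i] = index_dict[i][0] - index_dict[i][1]
--
--     # 다음 달 받을 선물 개수 계산
--     for i in range(length):
--         for j in range(i, length):
--             if i != j:
--                 if table[i][j] > table[j][i]:
--                     next_month[i] += 1
--                 elif table[i][j] < table[j][i]: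
--                     next_month[j] += 1
--                 else:
--                     if gift_index[i] > gift_index[j]:
--                         next_month[i] += 1
--                     elif gift_index[i] < gift_index[j]:
--                         next_month[j] += 1
--
--     return max(next_month)
-- ===== SOURCE B (Python) =====
-- def solution(friends, gifts):
--     # Sparse algorithm: one pass over gifts collects pair counts, net gift index,
--     # and the distinct unordered pairs that actually exchanged gifts.  A sorted
--     # rank of gift indices gives each friend a baseline score (pairs with no
--     # gifts are decided by gift index alone); only the at-most-m pairs that
--     # exchanged gifts get a correction.  O((n+m) log(n+m)) vs A's O(n^2 + m).
--     cnt = {}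
--     net = {}
--     pairs = []
--     for gift in gifts:
--         g, t = gift.split()
--         if g != t and (g, t) not in cnt and (t, g) not in cnt:
--             pairs.append((g, t))
--         cnt[(g, t)] = cnt.get((g, t), 0) + 1
--         net[g] = net.get(g, 0) + 1
--         net[t] = net.get(t, 0) - 1
--
--     gis = sorted(net.get(a, 0) for a in friends)
--     rank = {}
--     for i, v in enumerate(gis):
--         if v not in rank:
--             rank[v] = i          # index of first occurrence = #values strictly below v
--
--     score = {a: rank[net.get(a, 0)] for a in friends}
--     for a, b in pairs:
--         d = cnt[(a, b)] - cnt.get((b, a), 0)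
--         if d:
--             w, l = (a, b) if d > 0 else (b, a)
--             if not net.get(l, 0) < net.get(w, 0):
--                 score[w] += 1    # baseline missed this win (decided by gifts, not index)
--             if net.get(w, 0) < net.get(l, 0):
--                 score[l] -= 1    # baseline wrongly credited the loser
--     return max(score.values())
-- ===== Notes on version B (the rewrite author's own statement) =====
-- stated objective: faster
-- what changed: Replaces A's full O(n^2) pairwise tournament scan by a sparse algorithm: a sorted rank of gift indices gives each friend a baseline score in O(n log n), and only the distinct pairs that actually exchanged gifts (at most m) receive a correction.
-- outside the precondition, e.g. on solution(['a', 'a', 'b'], ['a b', 'a b']): A returns 2, B returns 1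
import Mathlib
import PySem

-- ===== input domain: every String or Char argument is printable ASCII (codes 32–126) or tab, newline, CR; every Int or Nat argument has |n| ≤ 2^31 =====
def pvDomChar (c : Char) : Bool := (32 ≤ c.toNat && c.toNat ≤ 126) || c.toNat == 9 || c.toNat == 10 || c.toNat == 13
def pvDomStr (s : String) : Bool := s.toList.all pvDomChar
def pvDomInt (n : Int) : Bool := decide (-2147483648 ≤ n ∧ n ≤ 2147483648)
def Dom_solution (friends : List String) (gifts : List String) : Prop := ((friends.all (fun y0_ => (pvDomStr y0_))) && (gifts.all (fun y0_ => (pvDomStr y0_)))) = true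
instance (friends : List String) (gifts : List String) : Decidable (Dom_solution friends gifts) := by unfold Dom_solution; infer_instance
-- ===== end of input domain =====

-- B replaces A's full O(n^2) pairwise tournament scan by a sparse algorithm: a sorted rank of
-- gift indices gives every friend a baseline score, and only the distinct pairs that actually
-- exchanged gifts receive a correction (objective: faster).

-- ===== PORT A =====
-- A-side helpers: the gifts-loop body and the pair-loop body, named so the proofs can speak of them.
-- `none` = the Python raises (ValueError on unpack, KeyError on an unknown name).
-- giver/taker are values of name_dict, hence indices in range(length): the total pyGetD/pySetD
-- and the `modify` with default are exact there (the keys always exist).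
def aStep (name_dict : PySem.Dict String Int)
    (st? : Option (List (List Int) × PySem.Dict Int (Int × Int))) (gift : String) :
    Option (List (List Int) × PySem.Dict Int (Int × Int)) :=
  st?.bind (fun st =>
    match PySem.Str.split₀ gift with
    | [gs, ts] =>
      match name_dict.get? gs, name_dict.get? ts with
      | some giver, some taker =>
        let row := PySem.List.pyGetD st.1 giver []
        some (PySem.List.pySetD st.1 giver
                (PySem.List.pySetD row taker (PySem.List.pyGetD row taker 0 + 1)),
              (st.2.modify giver ((0 : Int), (0 : Int)) (fun p => (p.1 + 1, p.2))).modify taker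
                ((0 : Int), (0 : Int)) (fun p => (p.1, p.2 + 1)))
      | _, _ => none
    | _ => none)

def aPair (table : List (List Int)) (gift_index : List Int) (i : Int)
    (nm : List Int) (j : Int) : List Int :=
  if i ≠ j then
    let tij := PySem.List.pyGetD (PySem.List.pyGetD table i []) j 0
    let tji := PySem.List.pyGetD (PySem.List.pyGetD table j []) i 0
    if tij > tji then PySem.List.pySetD nm i (PySem.List.pyGetD nm i 0 + 1)
    else if tij < tji then PySem.List.pySetD nm j (PySem.List.pyGetD nm j 0 + 1)
    else
      let gii := PySem.List.pyGetD gift_index i 0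
      let gij := PySem.List.pyGetD gift_index j 0
      if gii > gij then PySem.List.pySetD nm i (PySem.List.pyGetD nm i 0 + 1)
      else if gii < gij then PySem.List.pySetD nm j (PySem.List.pyGetD nm j 0 + 1)
      else nm
  else nm

def solution (friends : List String) (gifts : List String) : Int :=
  let length : Int := (friends.length : Int)
  let table0 : List (List Int) :=
    (PySem.List.pyRange 0 length 1).map (fun _ =>
      (PySem.List.pyRange 0 (friends.length : Int) 1).map (fun _ => (0 : Int)))
  let name_dict : PySem.Dict String Int :=
    (PySem.List.enumerate friends 0).foldl (fun d p => d.insert p.2 p.1) PySem.Dict.empty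
  let index_dict0 : PySem.Dict Int (Int × Int) :=
    (PySem.List.pyRange 0 length 1).foldl (fun d i => d.insert i ((0 : Int), (0 : Int))) PySem.Dict.empty
  let st? := gifts.foldl (aStep name_dict) (some (table0, index_dict0))
  match st? with
  | none => 0
  | some (table, index_dict) =>
    let gift_index : List Int :=
      (PySem.List.pyRange 0 length 1).map (fun i =>
        (index_dict.getD i ((0 : Int), (0 : Int))).1 - (index_dict.getD i ((0 : Int), (0 : Int))).2)
    let next_month : List Int :=
      (PySem.List.pyRange 0 length 1).foldl (fun nm i =>
        (PySem.List.pyRange i length 1).foldl (aPair table gift_index i) nm)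
        ((PySem.List.pyRange 0 length 1).map (fun _ => (0 : Int)))
    match PySem.List.max? next_month (fun x => x) with
    | some m => m
    | none => 0  -- max([]) raises ValueError: excluded by Pre_

-- ===== PORT B =====
-- B-side helpers: the one-pass tally step (pair counter, net gift index, distinct exchanged
-- pairs), the rank-building step over the sorted gift indices, and the per-pair correction
-- step of Source B.  `none` = the Python raises (ValueError on unpack).  Lookups written with
-- getD are Python's d[k] on keys that are always present under Pre_.
def bPure (st : PySem.Dict (String × String) Int × PySem.Dict String Int × List (String × String))
    (q : String × String) :
    PySem.Dict (String × String) Int × PySem.Dict String Int × List (String × String) :=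
  let cnt := st.1
  let net := st.2.1
  let prs := if q.1 ≠ q.2 ∧ q ∉ cnt.keys ∧ (q.2, q.1) ∉ cnt.keys then st.2.2 ++ [q] else st.2.2
  (cnt.insert q (cnt.getD q 0 + 1),
   (net.insert q.1 (net.getD q.1 0 + 1)).insert q.2
     ((net.insert q.1 (net.getD q.1 0 + 1)).getD q.2 0 - 1),
   prs)

def bStep (st? : Option (PySem.Dict (String × String) Int × PySem.Dict String Int × List (String × String)))
    (gift : String) :
    Option (PySem.Dict (String × String) Int × PySem.Dict String Int × List (String × String)) :=
  st?.bind (fun st =>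
    match PySem.Str.split₀ gift with
    | [g, t] => some (bPure st (g, t))
    | _ => none)

def bRankStep (r : PySem.Dict Int Int) (p : Int × Int) : PySem.Dict Int Int :=
  if r.contains p.2 then r else r.insert p.2 p.1

def bCorrStep (cnt : PySem.Dict (String × String) Int) (net : PySem.Dict String Int)
    (s : PySem.Dict String Int) (q : String × String) : PySem.Dict String Int :=
  let d := cnt.getD q 0 - cnt.getD (q.2, q.1) 0  -- cnt[(a,b)]: the key is present for every recorded pair
  if d ≠ 0 then
    let w := if d > 0 then q.1 else q.2
    let l := if d > 0 then q.2 else q.1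
    -- score[w] += 1 / score[l] -= 1 : the keys are friends, hence present under Pre_
    let s1 := if ¬ net.getD l 0 < net.getD w 0 then s.insert w (s.getD w 0 + 1) else s
    if net.getD w 0 < net.getD l 0 then s1.insert l (s1.getD l 0 - 1) else s1
  else s

def solution_alt (friends : List String) (gifts : List String) : Int :=
  match gifts.foldl bStep (some (PySem.Dict.empty, PySem.Dict.empty, [])) with
  | none => 0  -- the unpack raised: outside Pre_
  | some (cnt, net, prs) =>
    let gis := PySem.List.sorted (friends.map (fun a => net.getD a 0)) (fun x => x) false
    let rank := (PySem.List.enumerate gis 0).foldl bRankStep PySem.Dict.empty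
    -- rank[net.get(a, 0)]: the key is present (every friend's index is in gis)
    let score0 := friends.foldl (fun s a => s.insert a (rank.getD (net.getD a 0) 0)) PySem.Dict.empty
    let score := prs.foldl (bCorrStep cnt net) score0
    match PySem.List.max? score.values (fun x => x) with
    | some m => m
    | none => 0  -- max() of no values raises ValueError: excluded by Pre_

-- ===== PRECONDITION & SPEC =====
def giftOk (friends : List String) (s : String) : Bool :=
  match PySem.Str.split₀ s with
  | [g, t] => friends.contains g && friends.contains t
  | _ => false

-- Pre_ excludes: empty friends (A's max([]) raises ValueError), gifts that do not split into
-- exactly two tokens (ValueError) or name a non-friend (KeyError), and duplicate friend names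
-- combined with a nonempty gift list, on which A's last-wins name_dict index assignment is accidental.
def Pre_solution (friends : List String) (gifts : List String) : Prop :=
  friends ≠ [] ∧ (friends.Nodup ∨ gifts = []) ∧ ∀ s ∈ gifts, giftOk friends s = true

instance (friends : List String) (gifts : List String) : Decidable (Pre_solution friends gifts) := by
  unfold Pre_solution; infer_instance

def pvWitness_solution : List String × List String := (["a", "b"], ["a b"])

def Spec_solution (friends : List String) (gifts : List String) (out : Int) : Prop := out = solution_alt friends gifts
instance (friends : List String) (gifts : List String) (out : Int) : Decidable (Spec_solution friends gifts out) := by unfold Spec_solution; infer_instance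

-- ===== CLAIM (what is proved, stated in full; the proofs are below) =====
def Claim_equal_solution : Prop := ∀ (friends : List String) (gifts : List String), Dom_solution friends gifts → Pre_solution friends gifts → Spec_solution friends gifts (solution friends gifts)

-- ===== LEMMAS AND PROOFS =====

-- the parsed (giver, taker) pair of one gift line
def parseGift (s : String) : Option (String × String) :=
  match PySem.Str.split₀ s with
  | [g, t] => some (g, t)
  | _ => none

def pairsOf (gifts : List String) : List (String × String) := gifts.filterMap parseGift

-- reference counts over names
def cntN (L : List (String × String)) (a b : String) : Int := (L.count (a, b) : Int)
def givN (L : List (String × String)) (a : String) : Int := ((L.map Prod.fst).count a : Int)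
def recN (L : List (String × String)) (a : String) : Int := ((L.map Prod.snd).count a : Int)
def giN (L : List (String × String)) (a : String) : Int := givN L a - recN L a
def winN (L : List (String × String)) (a b : String) : Bool :=
  cntN L a b > cntN L b a || (cntN L a b == cntN L b a && giN L a > giN L b)

-- ---------- A side: name_dict ----------
lemma nd_notmem (l : List String) (s : Int) (d : PySem.Dict String Int) (x : String)
    (hx : x ∉ l) :
    ((PySem.List.enumerate l s).foldl (fun d p => d.insert p.2 p.1) d).get? x = d.get? x := by
  induction l generalizing s d with
  | nil => simp [PySem.List.enumerate_nil]
  | cons a t ih =>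
    rw [PySem.List.enumerate_cons]
    simp only [List.foldl_cons]
    rw [ih _ _ (fun hm => hx (by simp [hm]))]
    exact PySem.Dict.get?_insert_of_ne _ _ (fun he => hx (by simp [he]))

lemma nd_get (l : List String) (hnd : l.Nodup) (s : Int) (d : PySem.Dict String Int)
    (i : Nat) (hi : i < l.length) :
    ((PySem.List.enumerate l s).foldl (fun d p => d.insert p.2 p.1) d).get? l[i] = some (s + i) := by
  induction l generalizing s d i with
  | nil => simp at hi
  | cons a t ih =>
    rw [PySem.List.enumerate_cons]
    simp only [List.foldl_cons]
    cases i with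
    | zero =>
      simp only [List.getElem_cons_zero]
      have ha : a ∉ t := by
        intro hm; exact (List.nodup_cons.mp hnd).1 hm
      rw [nd_notmem _ _ _ _ ha]
      rw [PySem.Dict.get?_insert_self]
      simp
    | succ m =>
      have hm : m < t.length := by simpa using hi
      simpa [add_assoc, add_comm, add_left_comm] using
        ih (List.nodup_cons.mp hnd).2 (s + 1) (d.insert a s) m hm

-- ---------- A side: initial index_dict ----------
lemma ix0_getD (l : List Int) (d : PySem.Dict Int (Int × Int))
    (hd : ∀ k, d.getD k ((0:Int),(0:Int)) = (0, 0)) (k : Int) :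
    (l.foldl (fun d i => d.insert i ((0:Int),(0:Int))) d).getD k (0, 0) = (0, 0) := by
  induction l generalizing d with
  | nil => exact hd k
  | cons a t ih =>
    simp only [List.foldl_cons]
    exact ih _ (fun k' => by rw [PySem.Dict.getD_insert]; split <;> simp [hd])

lemma modify2_getD (ix : PySem.Dict Int (Int × Int)) (ig it k : Nat) :
    ((ix.modify ((ig : Nat) : Int) ((0:Int),(0:Int)) (fun p => (p.1 + 1, p.2))).modify
        ((it : Nat) : Int) ((0:Int),(0:Int)) (fun p => (p.1, p.2 + 1))).getD (k : Int) (0, 0)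
      = ((ix.getD (k : Int) (0, 0)).1 + (if k = ig then 1 else 0),
         (ix.getD (k : Int) (0, 0)).2 + (if k = it then 1 else 0)) := by
  simp only [PySem.Dict.getD_modify, Nat.cast_inj]
  split_ifs <;> simp_all

-- ---------- A side: gifts loop invariant ----------
lemma a_loop (friends : List String) (hnd : friends.Nodup) (gifts : List String)
    (h : ∀ s ∈ gifts, giftOk friends s = true)
    (tb : List (List Int)) (ix : PySem.Dict Int (Int × Int))
    (htb : tb.length = friends.length)
    (hrow : ∀ i : Nat, i < friends.length → (tb.getD i []).length = friends.length) :
    ∃ TB IX,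
      gifts.foldl (aStep ((PySem.List.enumerate friends 0).foldl (fun d p => d.insert p.2 p.1) PySem.Dict.empty)) (some (tb, ix)) = some (TB, IX) ∧
      TB.length = friends.length ∧
      (∀ i : Nat, i < friends.length → (TB.getD i []).length = friends.length) ∧
      (∀ i j : Nat, i < friends.length → j < friends.length →
        (TB.getD i []).getD j 0 = (tb.getD i []).getD j 0
          + cntN (pairsOf gifts) (friends.getD i "") (friends.getD j "")) ∧
      (∀ k : Nat, k < friends.length →
        IX.getD (k : Int) (0, 0) =
          ((ix.getD (k : Int) (0, 0)).1 + givN (pairsOf gifts) (friends.getD k ""),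
           (ix.getD (k : Int) (0, 0)).2 + recN (pairsOf gifts) (friends.getD k ""))) := by
  induction gifts generalizing tb ix with
  | nil =>
    refine ⟨tb, ix, rfl, htb, hrow, ?_, ?_⟩
    · intro i j hi hj; simp [pairsOf, cntN]
    · intro k hk; simp [pairsOf, givN, recN]
  | cons s rest ih =>
    have hs := h s (by simp)
    unfold giftOk at hs
    rcases hsp : PySem.Str.split₀ s with _ | ⟨gs, tl⟩
    · rw [hsp] at hs; simp at hs
    rcases tl with _ | ⟨ts, tl2⟩
    · rw [hsp] at hs; simp at hs
    rcases tl2 with _ | ⟨u, tl3⟩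
    swap
    · rw [hsp] at hs; simp at hs
    rw [hsp] at hs
    simp only [Bool.and_eq_true, List.contains_eq_mem, decide_eq_true_eq] at hs
    obtain ⟨ig, hig, hgeq⟩ := List.mem_iff_getElem.mp hs.1
    obtain ⟨it, hit, hteq⟩ := List.mem_iff_getElem.mp hs.2
    have hgget : ((PySem.List.enumerate friends 0).foldl (fun d p => d.insert p.2 p.1) PySem.Dict.empty).get? gs = some ((ig : Nat) : Int) := by
      have h2 := nd_get friends hnd 0 PySem.Dict.empty ig hig
      rw [hgeq] at h2; simpa using h2
    have htget : ((PySem.List.enumerate friends 0).foldl (fun d p => d.insert p.2 p.1) PySem.Dict.empty).get? ts = some ((it : Nat) : Int) := by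
      have h2 := nd_get friends hnd 0 PySem.Dict.empty it hit
      rw [hteq] at h2; simpa using h2
    have hrowlen : (tb.getD ig []).length = friends.length := hrow ig hig
    have hstep : aStep ((PySem.List.enumerate friends 0).foldl (fun d p => d.insert p.2 p.1) PySem.Dict.empty) (some (tb, ix)) s
        = some (tb.set ig ((tb.getD ig []).set it ((tb.getD ig []).getD it 0 + 1)),
            (ix.modify ((ig : Nat) : Int) ((0:Int),(0:Int)) (fun p => (p.1 + 1, p.2))).modify
              ((it : Nat) : Int) ((0:Int),(0:Int)) (fun p => (p.1, p.2 + 1))) := by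
      simp only [aStep, Option.bind_some, hsp, hgget, htget,
        PySem.List.pyGetD_natCast, PySem.List.pySetD_natCast]
    have htbl' : (tb.set ig ((tb.getD ig []).set it ((tb.getD ig []).getD it 0 + 1))).length = friends.length := by
      simp [htb]
    have hgetd_tb' : ∀ i : Nat, i < friends.length →
        (tb.set ig ((tb.getD ig []).set it ((tb.getD ig []).getD it 0 + 1))).getD i []
          = if i = ig then (tb.getD ig []).set it ((tb.getD ig []).getD it 0 + 1) else tb.getD i [] := by
      intro i hi
      by_cases hieq : i = ig
      · rw [if_pos hieq, hieq, List.getD_eq_getElem?_getD, List.getElem?_set_self (by omega)]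
        rfl
      · rw [if_neg hieq, List.getD_eq_getElem?_getD, List.getElem?_set_ne (by omega),
          ← List.getD_eq_getElem?_getD]
    have hrow' : ∀ i : Nat, i < friends.length →
        ((tb.set ig ((tb.getD ig []).set it ((tb.getD ig []).getD it 0 + 1))).getD i []).length = friends.length := by
      intro i hi
      rw [hgetd_tb' i hi]
      split
      · simpa using hrowlen
      · exact hrow i hi
    obtain ⟨TB, IX, hfold, hTBlen, hTBrow, hTBent, hIXent⟩ :=
      ih (fun x hx => h x (by simp [hx])) _ _ htbl' hrow'
    have hpairs : pairsOf (s :: rest) = (gs, ts) :: pairsOf rest := by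
      simp [pairsOf, parseGift, hsp]
    refine ⟨TB, IX, ?_, hTBlen, hTBrow, ?_, ?_⟩
    · rw [List.foldl_cons, hstep]; exact hfold
    · intro i j hi hj
      rw [hTBent i j hi hj, hpairs]
      have hcnt : cntN ((gs, ts) :: pairsOf rest) (friends.getD i "") (friends.getD j "")
          = cntN (pairsOf rest) (friends.getD i "") (friends.getD j "")
            + if gs = friends.getD i "" ∧ ts = friends.getD j "" then 1 else 0 := by
        simp only [cntN, List.count_cons, Prod.mk.injEq]
        split <;> simp_all
      rw [hcnt]
      have hginj : (gs = friends.getD i "") ↔ i = ig := by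
        rw [List.getD_eq_getElem _ _ hi, ← hgeq]
        constructor
        · intro hh; exact (List.Nodup.getElem_inj_iff hnd).mp hh.symm
        · intro hh; subst hh; rfl
      have htinj : (ts = friends.getD j "") ↔ j = it := by
        rw [List.getD_eq_getElem _ _ hj, ← hteq]
        constructor
        · intro hh; exact (List.Nodup.getElem_inj_iff hnd).mp hh.symm
        · intro hh; subst hh; rfl
      rw [hgetd_tb' i hi]
      by_cases hieq : i = ig
      · rw [if_pos hieq]
        by_cases hjeq : j = it
        · rw [if_pos ⟨hginj.mpr hieq, htinj.mpr hjeq⟩, hjeq,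
            List.getD_eq_getElem?_getD, List.getElem?_set_self (by omega)]
          simp only [Option.getD_some]
          rw [hieq, List.getD_eq_getElem?_getD]
          ring
        · rw [if_neg (fun hc => hjeq (htinj.mp hc.2)),
            List.getD_eq_getElem?_getD, List.getElem?_set_ne (by omega),
            ← List.getD_eq_getElem?_getD, hieq]
          ring
      · rw [if_neg hieq, if_neg (fun hc => hieq (hginj.mp hc.1))]
        ring
    · intro k hk
      rw [hIXent k hk, hpairs]
      have hgiv : givN ((gs, ts) :: pairsOf rest) (friends.getD k "")
          = givN (pairsOf rest) (friends.getD k "") + if gs = friends.getD k "" then 1 else 0 := by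
        simp only [givN, List.map_cons, List.count_cons]
        split <;> simp_all
      have hrec : recN ((gs, ts) :: pairsOf rest) (friends.getD k "")
          = recN (pairsOf rest) (friends.getD k "") + if ts = friends.getD k "" then 1 else 0 := by
        simp only [recN, List.map_cons, List.count_cons]
        split <;> simp_all
      rw [hgiv, hrec]
      have hginj : (gs = friends.getD k "") ↔ k = ig := by
        rw [List.getD_eq_getElem _ _ hk, ← hgeq]
        constructor
        · intro hh; exact (List.Nodup.getElem_inj_iff hnd).mp hh.symm
        · intro hh; subst hh; rfl
      have htinj : (ts = friends.getD k "") ↔ k = it := by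
        rw [List.getD_eq_getElem _ _ hk, ← hteq]
        constructor
        · intro hh; exact (List.Nodup.getElem_inj_iff hnd).mp hh.symm
        · intro hh; subst hh; rfl
      have hixk := modify2_getD ix ig it k
      rw [hixk]
      simp only [hginj, htinj, Prod.mk.injEq]
      constructor <;> ring

-- ---------- generic bump loop ----------
lemma bump_loop (ps : List (Int × Int)) (tgt : Int × Int → Option Int)
    (S : List Int → Int × Int → List Int)
    (hS : ∀ nm p, S nm p = match tgt p with
      | some t => PySem.List.pySetD nm t (PySem.List.pyGetD nm t 0 + 1)
      | none => nm)
    (nm : List Int)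
    (htgt : ∀ p ∈ ps, ∀ t, tgt p = some t → 0 ≤ t ∧ t.toNat < nm.length) :
    (ps.foldl S nm).length = nm.length ∧
    ∀ k : Nat, k < nm.length →
      (ps.foldl S nm).getD k 0 = nm.getD k 0 + ((ps.countP (fun p => tgt p == some (k : Int))) : Int) := by
  induction ps generalizing nm with
  | nil => simp
  | cons p t ih =>
    simp only [List.foldl_cons]
    rw [hS]
    rcases hp : tgt p with _ | tval
    · simp only []
      obtain ⟨ihl, ihe⟩ := ih nm (fun q hq => htgt q (by simp [hq]))
      refine ⟨ihl, fun k hk => ?_⟩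
      rw [ihe k hk, List.countP_cons]
      simp [hp]
    · simp only []
      obtain ⟨h0, hlt⟩ := htgt p (by simp) tval hp
      have hcast : tval = ((tval.toNat : Nat) : Int) := (Int.toNat_of_nonneg h0).symm
      have hset : PySem.List.pySetD nm tval (PySem.List.pyGetD nm tval 0 + 1)
          = nm.set tval.toNat (nm.getD tval.toNat 0 + 1) := by
        rw [hcast, PySem.List.pySetD_natCast, PySem.List.pyGetD_natCast]
        simp
        rw [max_eq_left h0]
      rw [hset]
      have hlen' : (nm.set tval.toNat (nm.getD tval.toNat 0 + 1)).length = nm.length := by simp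
      obtain ⟨ihl, ihe⟩ := ih _ (fun q hq tq hq2 => by rw [hlen']; exact htgt q (by simp [hq]) tq hq2)
      refine ⟨by rw [ihl, hlen'], fun k hk => ?_⟩
      rw [ihe k (by rw [hlen']; exact hk), List.countP_cons]
      by_cases hkt : tval.toNat = k
      · subst hkt
        rw [List.getD_eq_getElem?_getD, List.getElem?_set_self (by omega)]
        have hbeq : (tgt p == some ((tval.toNat : Nat) : Int)) = true := by
          rw [hp, ← hcast]; simp
        rw [hbeq]
        simp [List.getD_eq_getElem?_getD]
        omega
      · rw [List.getD_eq_getElem?_getD, List.getElem?_set_ne (by omega)]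
        have hbeq : (tgt p == some ((k : Nat) : Int)) = false := by
          rw [hp]
          refine beq_eq_false_iff_ne.mpr ?_
          intro h
          have := Option.some.inj h
          omega
        rw [hbeq]
        simp [List.getD_eq_getElem?_getD]

-- ---------- pair-loop bookkeeping ----------
-- which entry a processed pair (i, j) bumps in A's triangular loop
def tgtF (TB : List (List Int)) (GI : List Int) (p : Int × Int) : Option Int :=
  if p.1 = p.2 then none
  else if PySem.List.pyGetD (PySem.List.pyGetD TB p.1 []) p.2 0
          > PySem.List.pyGetD (PySem.List.pyGetD TB p.2 []) p.1 0 then some p.1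
  else if PySem.List.pyGetD (PySem.List.pyGetD TB p.1 []) p.2 0
          < PySem.List.pyGetD (PySem.List.pyGetD TB p.2 []) p.1 0 then some p.2
  else if PySem.List.pyGetD GI p.1 0 > PySem.List.pyGetD GI p.2 0 then some p.1
  else if PySem.List.pyGetD GI p.1 0 < PySem.List.pyGetD GI p.2 0 then some p.2
  else none

-- the one-sided "i beats j" test read off A's table
def winT (TB : List (List Int)) (GI : List Int) (a b : Int) : Bool :=
  decide (PySem.List.pyGetD (PySem.List.pyGetD TB a []) b 0
            > PySem.List.pyGetD (PySem.List.pyGetD TB b []) a 0)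
  || (PySem.List.pyGetD (PySem.List.pyGetD TB a []) b 0
        == PySem.List.pyGetD (PySem.List.pyGetD TB b []) a 0
      && decide (PySem.List.pyGetD GI a 0 > PySem.List.pyGetD GI b 0))

lemma aPair_match (TB : List (List Int)) (GI : List Int) (nm : List Int) (p : Int × Int) :
    aPair TB GI p.1 nm p.2 = match tgtF TB GI p with
      | some t => PySem.List.pySetD nm t (PySem.List.pyGetD nm t 0 + 1)
      | none => nm := by
  rcases p with ⟨i, j⟩
  simp only [aPair, tgtF]
  split_ifs <;> simp_all

lemma tgtF_eq (TB : List (List Int)) (GI : List Int) (i j : Int) :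
    tgtF TB GI (i, j) = if i = j then none
      else if winT TB GI i j then some i
      else if winT TB GI j i then some j
      else none := by
  simp only [tgtF, winT]
  split_ifs <;> simp_all <;> omega

lemma winT_asym (TB : List (List Int)) (GI : List Int) (a b : Int)
    (h : winT TB GI a b = true) : winT TB GI b a = false := by
  by_contra hc
  rw [Bool.not_eq_false] at hc
  simp only [winT, Bool.or_eq_true, Bool.and_eq_true, decide_eq_true_eq, beq_iff_eq] at h hc
  rcases h with h | ⟨h1, h2⟩ <;> rcases hc with hc | ⟨hc1, hc2⟩ <;> omega

lemma winT_irrefl (TB : List (List Int)) (GI : List Int) (a : Int) : winT TB GI a a = false := by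
  simp [winT]

lemma countP_flatMap {α β : Type} (l : List α) (f : α → List β) (p : β → Bool) :
    (l.flatMap f).countP p = (l.map (fun a => (f a).countP p)).sum := by
  induction l with
  | nil => simp
  | cons a t ih => simp [List.countP_append, ih]

lemma countP_unique {α : Type} (l : List α) (hnd : l.Nodup) (x : α) (hx : x ∈ l)
    (p : α → Bool) (hp : ∀ y ∈ l, p y = true → y = x) :
    l.countP p = if p x then 1 else 0 := by
  induction l with
  | nil => simp at hx
  | cons a t ih =>
    rw [List.countP_cons]
    rcases List.mem_cons.mp hx with hax | hxt
    · subst hax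
      have ht : t.countP p = 0 := by
        refine List.countP_eq_zero.mpr (fun y hy hpy => ?_)
        exact (List.nodup_cons.mp hnd).1 (hp y (by simp [hy]) hpy ▸ hy)
      rw [ht]
      split <;> simp_all
    · have hpa : p a = false := by
        by_contra hc
        have := hp a (by simp) (by revert hc; cases p a <;> simp)
        subst this
        exact (List.nodup_cons.mp hnd).1 hxt
      rw [ih (List.nodup_cons.mp hnd).2 hxt (fun y hy hpy => hp y (by simp [hy]) hpy), hpa]
      simp

lemma map_getD_range {α : Type} [Inhabited α] (l : List α) (d : α) :
    (List.range l.length).map (fun i => l.getD i d) = l := by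
  apply List.ext_getElem
  · simp
  · intro i h1 h2
    simp [List.getElem?_eq_getElem h2]

-- the combinatorial core: A's triangular dual-update visits entry k exactly as often as
-- the one-sided full scan counts wins of k
lemma count_pairs (N : Int) (w : Int → Int → Bool)
    (hasym : ∀ a b, w a b = true → w b a = false)
    (hirr : ∀ a, w a a = false)
    (k : Int) (hk : 0 ≤ k) (hkN : k < N) :
    (((PySem.List.pyRange 0 N 1).flatMap (fun i => (PySem.List.pyRange i N 1).map (fun j => (i, j)))).countP
        (fun p => (if p.1 = p.2 then none else if w p.1 p.2 then some p.1 else if w p.2 p.1 then some p.2 else none) == some k))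
      = (PySem.List.pyRange 0 N 1).countP (fun j => j != k && w k j) := by
  rw [countP_flatMap]
  have hsplit : PySem.List.pyRange 0 N 1 = PySem.List.pyRange 0 k 1 ++ PySem.List.pyRange k N 1 :=
    PySem.List.pyRange_one_append 0 k N hk (le_of_lt hkN)
  have hcons : PySem.List.pyRange k N 1 = k :: PySem.List.pyRange (k + 1) N 1 :=
    PySem.List.pyRange_one_cons hkN
  have hlow : ∀ i : Int, i < k →
      ((PySem.List.pyRange i N 1).map (fun j => (i, j))).countP
        (fun p => (if p.1 = p.2 then none else if w p.1 p.2 then some p.1 else if w p.2 p.1 then some p.2 else none) == some k)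
      = if w k i then 1 else 0 := by
    intro i hik
    rw [List.countP_map]
    have hne : i ≠ k := by omega
    have := countP_unique (PySem.List.pyRange i N 1) (PySem.List.nodup_pyRange_one i N) k
      (PySem.List.mem_pyRange_one.mpr ⟨le_of_lt hik, hkN⟩)
      ((fun p => (if p.1 = p.2 then none else if w p.1 p.2 then some p.1 else if w p.2 p.1 then some p.2 else none) == some k) ∘ (fun j => (i, j)))
      ?_
    · rw [this]
      have : ((fun p => (if p.1 = p.2 then none else if w p.1 p.2 then some p.1 else if w p.2 p.1 then some p.2 else none) == some k) ∘ (fun j => (i, j))) k = w k i := by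
        simp only [Function.comp_apply]
        rcases hik' : w i k with _ | _
        · rcases hki : w k i with _ | _ <;> simp [hne, hki]
        · have := hasym i k hik'
          simp [hne, this]
      rw [this]
    · intro y hy hpy
      simp only [Function.comp_apply, beq_iff_eq] at hpy
      split_ifs at hpy <;> simp_all
  have hhigh : ∀ i : Int, k < i →
      ((PySem.List.pyRange i N 1).map (fun j => (i, j))).countP
        (fun p => (if p.1 = p.2 then none else if w p.1 p.2 then some p.1 else if w p.2 p.1 then some p.2 else none) == some k)
      = 0 := by
    intro i hki
    rw [List.countP_map]
    refine List.countP_eq_zero.mpr (fun j hj hpj => ?_)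
    have hjr := PySem.List.mem_pyRange_one.mp hj
    simp only [Function.comp_apply, beq_iff_eq] at hpj
    split_ifs at hpj <;> simp_all <;> omega
  have hmid :
      ((PySem.List.pyRange k N 1).map (fun j => (k, j))).countP
        (fun p => (if p.1 = p.2 then none else if w p.1 p.2 then some p.1 else if w p.2 p.1 then some p.2 else none) == some k)
      = (PySem.List.pyRange k N 1).countP (fun j => j != k && w k j) := by
    rw [List.countP_map]
    refine List.countP_congr (fun j hj => ?_)
    simp only [Function.comp_apply]
    by_cases hjk : j = k
    · simp [hjk, hirr]
    · rcases hkj' : w k j with _ | _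
      · rcases hjk' : w j k with _ | _ <;> simp [hjk, hkj', Ne.symm hjk]
      · simp [hjk, hkj', Ne.symm hjk]
  rw [hsplit, List.map_append, List.sum_append, List.countP_append]
  have h1 : ((PySem.List.pyRange 0 k 1).map (fun i =>
      ((PySem.List.pyRange i N 1).map (fun j => (i, j))).countP
        (fun p => (if p.1 = p.2 then none else if w p.1 p.2 then some p.1 else if w p.2 p.1 then some p.2 else none) == some k))).sum
      = (PySem.List.pyRange 0 k 1).countP (fun i => w k i) := by
    rw [← PySem.List.sum_map_ite_one_zero_nat]
    apply congrArg
    refine List.map_congr_left (fun i hi => ?_)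
    have := PySem.List.mem_pyRange_one.mp hi
    rw [hlow i (by omega)]
  have h2 : ((PySem.List.pyRange k N 1).map (fun i =>
      ((PySem.List.pyRange i N 1).map (fun j => (i, j))).countP
        (fun p => (if p.1 = p.2 then none else if w p.1 p.2 then some p.1 else if w p.2 p.1 then some p.2 else none) == some k))).sum
      = (PySem.List.pyRange k N 1).countP (fun j => j != k && w k j) := by
    rw [hcons]
    simp only [List.map_cons, List.sum_cons]
    have hz : ((PySem.List.pyRange (k+1) N 1).map (fun i =>
        ((PySem.List.pyRange i N 1).map (fun j => (i, j))).countP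
          (fun p => (if p.1 = p.2 then none else if w p.1 p.2 then some p.1 else if w p.2 p.1 then some p.2 else none) == some k))).sum = 0 := by
      refine List.sum_eq_zero (fun x hx => ?_)
      obtain ⟨i, hi, hieq⟩ := List.mem_map.mp hx
      have := PySem.List.mem_pyRange_one.mp hi
      rw [← hieq, hhigh i (by omega)]
    rw [hz, hmid, hcons, List.countP_cons]
    simp
  have h3 : (PySem.List.pyRange 0 k 1).countP (fun j => j != k && w k j)
      = (PySem.List.pyRange 0 k 1).countP (fun i => w k i) := by
    refine List.countP_congr (fun j hj => ?_)
    have := PySem.List.mem_pyRange_one.mp hj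
    have : j ≠ k := by omega
    simp [this]
  rw [h1, h2, h3]

-- A reduced to the one-sided winN count (the shared reference form)
lemma a_result (friends : List String) (gifts : List String)
    (hnd : friends.Nodup) (hok : ∀ s ∈ gifts, giftOk friends s = true) :
    solution friends gifts
      = match PySem.List.max? (friends.map (fun a =>
          ((friends.countP (fun b => b != a && winN (pairsOf gifts) a b)) : Int))) (fun x => x) with
        | some m => m
        | none => 0 := by
  have htb0len : ((PySem.List.pyRange 0 (friends.length : Int) 1).map (fun _ =>
      (PySem.List.pyRange 0 (friends.length : Int) 1).map (fun _ => (0 : Int)))).length = friends.length := by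
    simp [PySem.List.length_pyRange_one]
  have hrow0 : ∀ i : Nat, i < friends.length →
      (((PySem.List.pyRange 0 (friends.length : Int) 1).map (fun _ =>
        (PySem.List.pyRange 0 (friends.length : Int) 1).map (fun _ => (0 : Int)))).getD i [])
      = (PySem.List.pyRange 0 (friends.length : Int) 1).map (fun _ => (0 : Int)) := by
    intro i hi
    rw [List.getD_eq_getElem _ _ (by rw [htb0len]; exact hi)]
    simp
  have hzero : ∀ j : Nat, j < friends.length →
      ((PySem.List.pyRange 0 (friends.length : Int) 1).map (fun _ => (0 : Int))).getD j 0 = 0 := by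
    intro j hj
    rw [List.getD_eq_getElem _ _ (by simp [PySem.List.length_pyRange_one]; omega)]
    simp
  obtain ⟨TB, IX, hfold, hTBlen, hTBrow, hTBent0, hIXent0⟩ :=
    a_loop friends hnd gifts hok
      ((PySem.List.pyRange 0 (friends.length : Int) 1).map (fun _ =>
        (PySem.List.pyRange 0 (friends.length : Int) 1).map (fun _ => (0 : Int))))
      ((PySem.List.pyRange 0 (friends.length : Int) 1).foldl (fun d i => d.insert i ((0:Int),(0:Int))) PySem.Dict.empty)
      htb0len
      (fun i hi => by rw [hrow0 i hi]; simp [PySem.List.length_pyRange_one])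
  have hIX : ∀ k : Nat, k < friends.length → IX.getD (k : Int) (0, 0)
      = (givN (pairsOf gifts) (friends.getD k ""), recN (pairsOf gifts) (friends.getD k "")) := by
    intro k hk
    rw [hIXent0 k hk, ix0_getD _ _ (fun k' => by simp) (k : Int)]
    simp
  have hTBent : ∀ i j : Nat, i < friends.length → j < friends.length →
      (TB.getD i []).getD j 0 = cntN (pairsOf gifts) (friends.getD i "") (friends.getD j "") := by
    intro i j hi hj
    rw [hTBent0 i j hi hj, hrow0 i hi, hzero j hj]
    ring
  have hA : solution friends gifts =
      (match PySem.List.max?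
        ((PySem.List.pyRange 0 (friends.length : Int) 1).foldl (fun nm i =>
          (PySem.List.pyRange i (friends.length : Int) 1).foldl
            (aPair TB ((PySem.List.pyRange 0 (friends.length : Int) 1).map (fun i =>
              (IX.getD i ((0 : Int), (0 : Int))).1 - (IX.getD i ((0 : Int), (0 : Int))).2)) i) nm)
          ((PySem.List.pyRange 0 (friends.length : Int) 1).map (fun _ => (0 : Int)))) (fun x => x) with
        | some m => m
        | none => 0) := by
    simp only [solution]
    rw [hfold]
  rw [hA]
  set GIl := (PySem.List.pyRange 0 (friends.length : Int) 1).map (fun i =>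
      (IX.getD i ((0 : Int), (0 : Int))).1 - (IX.getD i ((0 : Int), (0 : Int))).2) with hGIl
  set zeros := (PySem.List.pyRange 0 (friends.length : Int) 1).map (fun _ => (0 : Int)) with hzeros
  set pairsL := (PySem.List.pyRange 0 (friends.length : Int) 1).flatMap (fun i =>
      (PySem.List.pyRange i (friends.length : Int) 1).map (fun j => (i, j))) with hpairs
  have hflat : pairsL.foldl (fun nm p => aPair TB GIl p.1 nm p.2) zeros
      = (PySem.List.pyRange 0 (friends.length : Int) 1).foldl (fun nm i =>
          (PySem.List.pyRange i (friends.length : Int) 1).foldl (aPair TB GIl i) nm) zeros := by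
    rw [hpairs, List.foldl_flatMap]
    simp only [List.foldl_map]
  have hzl : zeros.length = friends.length := by
    rw [hzeros]; simp [PySem.List.length_pyRange_one]
  have htgtb : ∀ p ∈ pairsL, ∀ t, tgtF TB GIl p = some t → 0 ≤ t ∧ t.toNat < zeros.length := by
    intro p hp t ht
    rw [hpairs] at hp
    obtain ⟨i, hi, hpm⟩ := List.mem_flatMap.mp hp
    obtain ⟨j, hj, rfl⟩ := List.mem_map.mp hpm
    have hib := PySem.List.mem_pyRange_one.mp hi
    have hjb := PySem.List.mem_pyRange_one.mp hj
    rw [tgtF_eq] at ht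
    rw [hzl]
    split_ifs at ht <;> simp_all <;> omega
  obtain ⟨hNMlen, hNMent⟩ := bump_loop pairsL (tgtF TB GIl) (fun nm p => aPair TB GIl p.1 nm p.2)
      (fun nm p => aPair_match TB GIl nm p) zeros htgtb
  have hwinT : ∀ a b : Int, 0 ≤ a → a < (friends.length : Int) → 0 ≤ b → b < (friends.length : Int) →
      winT TB GIl a b = winN (pairsOf gifts) (friends.getD a.toNat "") (friends.getD b.toNat "") := by
    intro a b ha haN hb hbN
    have haa : a = ((a.toNat : Nat) : Int) := (Int.toNat_of_nonneg ha).symm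
    have hbb : b = ((b.toNat : Nat) : Int) := (Int.toNat_of_nonneg hb).symm
    have h1 : PySem.List.pyGetD (PySem.List.pyGetD TB a []) b 0
        = cntN (pairsOf gifts) (friends.getD a.toNat "") (friends.getD b.toNat "") := by
      rw [haa, hbb, PySem.List.pyGetD_natCast, PySem.List.pyGetD_natCast]
      exact hTBent a.toNat b.toNat (by omega) (by omega)
    have h2 : PySem.List.pyGetD (PySem.List.pyGetD TB b []) a 0
        = cntN (pairsOf gifts) (friends.getD b.toNat "") (friends.getD a.toNat "") := by
      rw [haa, hbb, PySem.List.pyGetD_natCast, PySem.List.pyGetD_natCast]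
      exact hTBent b.toNat a.toNat (by omega) (by omega)
    have h3 : PySem.List.pyGetD GIl a 0 = giN (pairsOf gifts) (friends.getD a.toNat "") := by
      rw [hGIl, PySem.List.pyGetD_map_pyRange_of_nonneg _ _ _ _ ha haN, haa,
        hIX a.toNat (by omega)]
      simp [giN, List.getD_eq_getElem?_getD]
      rw [max_eq_left ha]
    have h4 : PySem.List.pyGetD GIl b 0 = giN (pairsOf gifts) (friends.getD b.toNat "") := by
      rw [hGIl, PySem.List.pyGetD_map_pyRange_of_nonneg _ _ _ _ hb hbN, hbb,
        hIX b.toNat (by omega)]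
      simp [giN, List.getD_eq_getElem?_getD]
      rw [max_eq_left hb]
    simp only [winT, winN, h1, h2, h3, h4]
  have hAcount : ∀ k : Nat, k < friends.length →
      (pairsL.countP (fun p => tgtF TB GIl p == some (k : Int)))
        = (List.range friends.length).countP (fun t =>
            t != k && winN (pairsOf gifts) (friends.getD k "") (friends.getD t "")) := by
    intro k hk
    have heq : (fun p : Int × Int => tgtF TB GIl p == some (k : Int))
        = (fun p : Int × Int => ((if p.1 = p.2 then none
            else if winT TB GIl p.1 p.2 then some p.1
            else if winT TB GIl p.2 p.1 then some p.2 else none) == some (k : Int))) := by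
      funext p; rcases p with ⟨i, j⟩; rw [tgtF_eq]
    rw [hpairs, heq, count_pairs (friends.length : Int) (winT TB GIl) (winT_asym TB GIl)
      (winT_irrefl TB GIl) (k : Int) (by positivity) (by exact_mod_cast hk)]
    rw [PySem.List.pyRange_one, List.countP_map]
    have hn0 : (((friends.length : Int)) - 0).toNat = friends.length := by omega
    rw [hn0]
    refine List.countP_congr (fun t htm => ?_)
    have htn : t < friends.length := List.mem_range.mp htm
    simp only [Function.comp_apply, zero_add]
    rw [hwinT (k : Int) (t : Int) (by positivity) (by exact_mod_cast hk)
      (by positivity) (by exact_mod_cast htn)]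
    simp [bne]
  have base : ∀ p : String → Bool, friends.countP p
      = (List.range friends.length).countP (fun t => p (friends.getD t "")) := by
    intro p
    conv_lhs => rw [← map_getD_range friends ""]
    rw [List.countP_map]
    rfl
  have hBcount : ∀ k : Nat, k < friends.length →
      friends.countP (fun b => b != friends.getD k "" && winN (pairsOf gifts) (friends.getD k "") b)
        = (List.range friends.length).countP (fun t =>
            t != k && winN (pairsOf gifts) (friends.getD k "") (friends.getD t "")) := by
    intro k hk
    rw [base]
    refine List.countP_congr (fun t htm => ?_)
    have htn : t < friends.length := List.mem_range.mp htm
    have hbne : (friends.getD t "" != friends.getD k "") = (t != k) := by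
      rw [List.getD_eq_getElem _ _ htn, List.getD_eq_getElem _ _ hk]
      by_cases hEq : t = k
      · subst hEq; simp only [bne_self_eq_false]
      · have hgne : friends[t] ≠ friends[k] := fun hc => hEq (hnd.getElem_inj_iff.mp hc)
        have e1 : (friends[t] != friends[k]) = true := by simp [bne_iff_ne, hgne]
        have e2 : (t != k) = true := by simp [bne_iff_ne, hEq]
        rw [e1, e2]
    rw [hbne]
  have hlist : (PySem.List.pyRange 0 (friends.length : Int) 1).foldl (fun nm i =>
          (PySem.List.pyRange i (friends.length : Int) 1).foldl (aPair TB GIl i) nm) zeros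
      = friends.map (fun a =>
          ((friends.countP (fun b => b != a && winN (pairsOf gifts) a b)) : Int)) := by
    rw [← hflat]
    apply List.ext_getElem
    · rw [hNMlen, hzl]; simp
    · intro k h1 h2
      have hkn : k < friends.length := by simpa using h2
      rw [List.getElem_map,
        ← List.getD_eq_getElem (pairsL.foldl (fun nm p => aPair TB GIl p.1 nm p.2) zeros) 0 h1,
        hNMent k (by rw [hzl]; exact hkn)]
      rw [hzeros]
      rw [hzero k hkn]
      rw [hAcount k hkn]
      rw [← List.getD_eq_getElem friends "" (by simpa using h2), hBcount k hkn]
      ring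
  rw [hlist]

-- ---------- B side ----------
def uEqB (q r : String × String) : Bool := q == r || q == (r.2, r.1)

lemma uEqB_iff {q r : String × String} : uEqB q r = true ↔ q = r ∨ q = (r.2, r.1) := by
  simp [uEqB]

lemma uEqB_trans3 {x y z : String × String} (hx : uEqB x z = true) (hy : uEqB y z = true) :
    uEqB x y = true := by
  rcases uEqB_iff.mp hx with h | h <;> rcases uEqB_iff.mp hy with h' | h' <;>
    subst h <;> subst h' <;> simp [uEqB_iff]

lemma uEqB_swap_right {q : String × String} {a b : String} :
    uEqB q (b, a) = true ↔ uEqB q (a, b) = true := by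
  simp [uEqB_iff, or_comm]

-- unpack loop → pure pair loop
lemma b_loop (gifts : List String) (h : ∀ s ∈ gifts, (parseGift s).isSome)
    (st : PySem.Dict (String × String) Int × PySem.Dict String Int × List (String × String)) :
    gifts.foldl bStep (some st) = some ((pairsOf gifts).foldl bPure st) := by
  induction gifts generalizing st with
  | nil => simp [pairsOf]
  | cons s rest ih =>
    have hs := h s (by simp)
    rcases hp : parseGift s with _ | ⟨g0, t0⟩
    · simp [hp] at hs
    · have hsplit : PySem.Str.split₀ s = [g0, t0] := by
        unfold parseGift at hp
        split at hp <;> simp_all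
      have hpr : pairsOf (s :: rest) = (g0, t0) :: pairsOf rest := by
        simp [pairsOf, hp]
      rw [hpr]
      simp only [List.foldl_cons, bStep, Option.bind_some, hsplit]
      exact ih (fun x hx => h x (by simp [hx])) _

-- component projections of the pure loop
lemma bPure_cnt (M : List (String × String))
    (st : PySem.Dict (String × String) Int × PySem.Dict String Int × List (String × String)) :
    (M.foldl bPure st).1 = M.foldl (fun c q => c.insert q (c.getD q 0 + 1)) st.1 := by
  induction M generalizing st with
  | nil => rfl
  | cons q t ih =>
    simp only [List.foldl_cons]
    rw [ih]
    rfl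

def netStep (n : PySem.Dict String Int) (q : String × String) : PySem.Dict String Int :=
  (n.insert q.1 (n.getD q.1 0 + 1)).insert q.2
    ((n.insert q.1 (n.getD q.1 0 + 1)).getD q.2 0 - 1)

lemma bPure_net (M : List (String × String))
    (st : PySem.Dict (String × String) Int × PySem.Dict String Int × List (String × String)) :
    (M.foldl bPure st).2.1 = M.foldl netStep st.2.1 := by
  induction M generalizing st with
  | nil => rfl
  | cons q t ih =>
    simp only [List.foldl_cons]
    rw [ih]
    rfl

lemma giN_cons (q : String × String) (t : List (String × String)) (x : String) :
    giN (q :: t) x = giN t x + (if q.1 = x then 1 else 0) - (if q.2 = x then 1 else 0) := by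
  simp only [giN, givN, recN, List.map_cons, List.count_cons, beq_iff_eq]
  push_cast
  split_ifs <;> omega

lemma net_getD (M : List (String × String)) (n : PySem.Dict String Int) (x : String) :
    (M.foldl netStep n).getD x 0 = n.getD x 0 + giN M x := by
  induction M generalizing n with
  | nil => simp [giN, givN, recN]
  | cons q t ih =>
    rw [List.foldl_cons, ih, giN_cons]
    have h1 : (netStep n q).getD x 0
        = n.getD x 0 + (if q.1 = x then 1 else 0) - (if q.2 = x then 1 else 0) := by
      unfold netStep
      rw [PySem.Dict.getD_insert, PySem.Dict.getD_insert, PySem.Dict.getD_insert]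
      by_cases e1 : x = q.1 <;> by_cases e2 : x = q.2
      · rw [if_pos e2, if_pos (e2.symm.trans e1), if_pos e1.symm, if_pos e2.symm, e1]
      · rw [if_neg e2, if_pos e1, if_pos e1.symm, if_neg (fun h : q.2 = x => e2 h.symm), e1]
        ring
      · rw [if_pos e2, if_neg (fun h : q.2 = q.1 => e1 (e2.trans h)),
          if_neg (fun h : q.1 = x => e1 h.symm), if_pos e2.symm, e2]
        ring
      · rw [if_neg e2, if_neg e1, if_neg (fun h : q.1 = x => e1 h.symm),
          if_neg (fun h : q.2 = x => e2 h.symm)]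
        ring
    rw [h1]
    ring

-- the deduplicated exchanged-pairs list: membership, completeness, uniqueness
lemma pairs_inv (M : List (String × String)) :
    ∀ (c : PySem.Dict (String × String) Int) (n : PySem.Dict String Int)
      (p done : List (String × String)),
    (∀ k, k ∈ c.keys ↔ k ∈ done) →
    (∀ q ∈ p, q ∈ done ∧ q.1 ≠ q.2) →
    (∀ q ∈ done, q.1 ≠ q.2 → ∃ q' ∈ p, uEqB q' q = true) →
    p.Pairwise (fun x y => uEqB x y = false) →
    (∀ q ∈ (M.foldl bPure (c, n, p)).2.2, q ∈ done ++ M ∧ q.1 ≠ q.2) ∧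
    (∀ q ∈ done ++ M, q.1 ≠ q.2 → ∃ q' ∈ (M.foldl bPure (c, n, p)).2.2, uEqB q' q = true) ∧
    (M.foldl bPure (c, n, p)).2.2.Pairwise (fun x y => uEqB x y = false) := by
  induction M with
  | nil =>
    intro c n p done hc h1 h2 h3
    simp only [List.foldl_nil, List.append_nil]
    exact ⟨h1, h2, h3⟩
  | cons q0 M ih =>
    intro c n p done hc h1 h2 h3
    simp only [List.foldl_cons]
    have hbp : bPure (c, n, p) q0
        = (c.insert q0 (c.getD q0 0 + 1),
           (n.insert q0.1 (n.getD q0.1 0 + 1)).insert q0.2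
             ((n.insert q0.1 (n.getD q0.1 0 + 1)).getD q0.2 0 - 1),
           if q0.1 ≠ q0.2 ∧ q0 ∉ c.keys ∧ (q0.2, q0.1) ∉ c.keys then p ++ [q0] else p) := rfl
    rw [hbp]
    set p' := if q0.1 ≠ q0.2 ∧ q0 ∉ c.keys ∧ (q0.2, q0.1) ∉ c.keys then p ++ [q0] else p with hp'
    have hc' : ∀ k, k ∈ (c.insert q0 (c.getD q0 0 + 1)).keys ↔ k ∈ done ++ [q0] := by
      intro k
      rw [PySem.Dict.mem_keys_insert]
      simp [hc k, or_comm]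
    have h1' : ∀ r ∈ p', r ∈ done ++ [q0] ∧ r.1 ≠ r.2 := by
      intro r hr
      rw [hp'] at hr
      by_cases hg : q0.1 ≠ q0.2 ∧ q0 ∉ c.keys ∧ (q0.2, q0.1) ∉ c.keys
      · rw [if_pos hg] at hr
        rcases List.mem_append.mp hr with h | h
        · exact ⟨List.mem_append_left _ (h1 r h).1, (h1 r h).2⟩
        · have hrq : r = q0 := by simpa using h
          subst hrq
          exact ⟨List.mem_append_right _ (by simp), hg.1⟩
      · rw [if_neg hg] at hr
        exact ⟨List.mem_append_left _ (h1 r hr).1, (h1 r hr).2⟩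
    have h2' : ∀ r ∈ done ++ [q0], r.1 ≠ r.2 → ∃ q' ∈ p', uEqB q' r = true := by
      intro r hr hrne
      by_cases hg : q0.1 ≠ q0.2 ∧ q0 ∉ c.keys ∧ (q0.2, q0.1) ∉ c.keys
      · rw [hp', if_pos hg]
        rcases List.mem_append.mp hr with h | h
        · obtain ⟨q', hq', hu⟩ := h2 r h hrne
          exact ⟨q', List.mem_append_left _ hq', hu⟩
        · have hrq : r = q0 := by simpa using h
          subst hrq
          exact ⟨r, List.mem_append_right _ (by simp), uEqB_iff.mpr (Or.inl rfl)⟩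
      · rw [hp', if_neg hg]
        rcases List.mem_append.mp hr with h | h
        · exact h2 r h hrne
        · have hrq : r = q0 := by simpa using h
          subst hrq
          rcases Decidable.em (r ∈ c.keys) with hk | hk
          · exact h2 r ((hc r).mp hk) hrne
          · rcases Decidable.em ((r.2, r.1) ∈ c.keys) with hk2 | hk2
            · obtain ⟨q', hq', hu⟩ := h2 (r.2, r.1) ((hc _).mp hk2) (fun he => hrne he.symm)
              exact ⟨q', hq', uEqB_swap_right.mp hu⟩
            · exact absurd ⟨hrne, hk, hk2⟩ hg
    have h3' : p'.Pairwise (fun x y => uEqB x y = false) := by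
      rw [hp']
      by_cases hg : q0.1 ≠ q0.2 ∧ q0 ∉ c.keys ∧ (q0.2, q0.1) ∉ c.keys
      · rw [if_pos hg]
        rw [List.pairwise_append]
        refine ⟨h3, by simp, ?_⟩
        intro x hx y hy
        have hyq : y = q0 := by simpa using hy
        subst hyq
        have hxd : x ∈ done := (h1 x hx).1
        refine Bool.eq_false_iff.mpr (fun hu => ?_)
        rcases uEqB_iff.mp hu with h | h
        · exact hg.2.1 ((hc y).mpr (h ▸ hxd))
        · exact hg.2.2 ((hc _).mpr (h ▸ hxd))
      · rw [if_neg hg]; exact h3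
    have := ih (c.insert q0 (c.getD q0 0 + 1))
      ((n.insert q0.1 (n.getD q0.1 0 + 1)).insert q0.2
        ((n.insert q0.1 (n.getD q0.1 0 + 1)).getD q0.2 0 - 1))
      p' (done ++ [q0]) hc' h1' h2' h3'
    simpa [List.append_assoc] using this

-- rank dict: first-occurrence index of each value in the sorted index list
lemma rank_preserve (l : List (Int × Int)) (r : PySem.Dict Int Int) (v j : Int)
    (h : r.get? v = some j) : (l.foldl bRankStep r).get? v = some j := by
  induction l generalizing r with
  | nil => exact h
  | cons p t ih =>
    simp only [List.foldl_cons]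
    apply ih
    unfold bRankStep
    split
    · exact h
    · by_cases hv : v = p.2
      · subst hv
        rename_i hcont
        rw [PySem.Dict.contains_eq_isSome_get?, h] at hcont
        simp at hcont
      · rw [PySem.Dict.get?_insert_of_ne _ _ hv]
        exact h

lemma rank_first (l : List Int) (k : Int) (r : PySem.Dict Int Int) (v : Int)
    (hv : v ∈ l) (hr : r.get? v = none) :
    ((PySem.List.enumerate l k).foldl bRankStep r).get? v
      = some (k + (l.findIdx (· == v) : Int)) := by
  induction l generalizing k r with
  | nil => simp at hv
  | cons h t ih =>
    rw [PySem.List.enumerate_cons]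
    simp only [List.foldl_cons]
    by_cases hvh : v = h
    · subst hvh
      have hstep : bRankStep r (k, v) = r.insert v k := by
        unfold bRankStep
        have hcf : r.contains v = false := by
          rw [PySem.Dict.contains_eq_isSome_get?, hr]; rfl
        simp [hcf]
      rw [hstep, rank_preserve _ _ v k (PySem.Dict.get?_insert_self _ _ _)]
      simp [List.findIdx_cons]
    · have hstep : (bRankStep r (k, h)).get? v = none := by
        unfold bRankStep
        split
        · exact hr
        · rw [PySem.Dict.get?_insert_of_ne _ _ hvh]
          exact hr
      have hvt : v ∈ t := by
        rcases List.mem_cons.mp hv with h' | h'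
        · exact absurd h' hvh
        · exact h'
      rw [ih (k + 1) _ hvt hstep]
      have hbeq : (h == v) = false := by
        simp only [beq_eq_false_iff_ne]
        exact fun e => hvh e.symm
      rw [List.findIdx_cons, hbeq]
      simp only [cond_false]
      congr 1
      push_cast
      ring

lemma findIdx_sorted (l : List Int) (hs : l.Pairwise (· ≤ ·)) (v : Int) (hv : v ∈ l) :
    l.findIdx (· == v) = l.countP (fun x => decide (x < v)) := by
  induction l with
  | nil => simp at hv
  | cons h t ih =>
    rw [List.findIdx_cons, List.countP_cons]
    by_cases hh : h = v
    · subst hh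
      have ht0 : t.countP (fun x => decide (x < h)) = 0 :=
        List.countP_eq_zero.mpr (fun x hx => by
          have := (List.pairwise_cons.mp hs).1 x hx
          simp
          omega)
      simp [ht0]
    · have hvt : v ∈ t := by
        rcases List.mem_cons.mp hv with h' | h'
        · exact absurd h'.symm hh
        · exact h'
      have hle : h ≤ v := (List.pairwise_cons.mp hs).1 v hvt
      have hlt : h < v := lt_of_le_of_ne hle hh
      have hbeq : (h == v) = false := by simp [hh]
      rw [hbeq]
      simp only [cond_false]
      rw [ih (List.pairwise_cons.mp hs).2 hvt]
      simp [hlt]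

-- score dict built by inserting a per-friend value
lemma ins_fold_getD_not_mem (F : String → Int) (l : List String)
    (s : PySem.Dict String Int) (a : String) (ha : a ∉ l) :
    (l.foldl (fun s x => s.insert x (F x)) s).getD a 0 = s.getD a 0 := by
  induction l generalizing s with
  | nil => rfl
  | cons x t ih =>
    simp only [List.foldl_cons]
    rw [ih _ (fun h => ha (List.mem_cons_of_mem _ h)), PySem.Dict.getD_insert]
    rw [if_neg (fun he : a = x => ha (by simp [he]))]

lemma ins_fold_getD_mem (F : String → Int) (l : List String)
    (s : PySem.Dict String Int) (a : String) (ha : a ∈ l) :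
    (l.foldl (fun s x => s.insert x (F x)) s).getD a 0 = F a := by
  induction l generalizing s with
  | nil => simp at ha
  | cons x t ih =>
    simp only [List.foldl_cons]
    by_cases hat : a ∈ t
    · exact ih _ hat
    · have hax : a = x := by
        rcases List.mem_cons.mp ha with h | h
        · exact h
        · exact absurd h hat
      subst hax
      rw [ins_fold_getD_not_mem F t _ a hat, PySem.Dict.getD_insert, if_pos rfl]

-- the correction value one processed pair contributes to friend a
def fvD (cnt : PySem.Dict (String × String) Int) (net : PySem.Dict String Int)
    (a b : String) : Int :=
  (if cnt.getD (a, b) 0 > cnt.getD (b, a) 0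
      ∨ (cnt.getD (a, b) 0 = cnt.getD (b, a) 0 ∧ net.getD b 0 < net.getD a 0) then 1 else 0)
  - (if net.getD b 0 < net.getD a 0 then 1 else 0)

def corrD (cnt : PySem.Dict (String × String) Int) (net : PySem.Dict String Int)
    (q : String × String) (a : String) : Int :=
  if q.1 = a then fvD cnt net a q.2 else if q.2 = a then fvD cnt net a q.1 else 0

lemma corr_core (s : PySem.Dict String Int) (w l : String) (hwl : w ≠ l) (gw gl : Int) (a : String) :
    (if gw < gl then
        (if ¬ gl < gw then s.insert w (s.getD w 0 + 1) else s).insert l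
          ((if ¬ gl < gw then s.insert w (s.getD w 0 + 1) else s).getD l 0 - 1)
      else (if ¬ gl < gw then s.insert w (s.getD w 0 + 1) else s)).getD a 0
    = s.getD a 0 + (if a = w ∧ ¬ gl < gw then 1 else 0) + (if a = l ∧ gw < gl then -1 else 0) := by
  by_cases h1 : gl < gw <;> by_cases h2 : gw < gl
  · omega
  · rw [if_neg h2, if_neg (not_not_intro h1)]
    simp [h1, h2]
  · rw [if_pos h2, if_pos (by omega : ¬ gl < gw)]
    rw [PySem.Dict.getD_insert, PySem.Dict.getD_insert, PySem.Dict.getD_insert,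
      if_neg (fun he : l = w => hwl he.symm)]
    by_cases hal : a = l <;> by_cases haw : a = w
    · exact absurd (haw.symm.trans hal) hwl
    · rw [if_pos hal, if_neg (fun hc : a = w ∧ ¬ gl < gw => haw hc.1), if_pos ⟨hal, h2⟩, hal]
      ring
    · rw [if_neg hal, if_pos haw, if_pos ⟨haw, h1⟩, if_neg (fun hc : a = l ∧ gw < gl => hal hc.1), haw]
      ring
    · rw [if_neg hal, if_neg haw, if_neg (fun hc : a = w ∧ ¬ gl < gw => haw hc.1),
        if_neg (fun hc : a = l ∧ gw < gl => hal hc.1)]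
      ring
  · rw [if_neg h2, if_pos (by omega : ¬ gl < gw), PySem.Dict.getD_insert]
    by_cases haw : a = w
    · rw [if_pos haw, if_pos ⟨haw, by omega⟩, if_neg (fun hc : a = l ∧ gw < gl => h2 hc.2), haw]
      ring
    · rw [if_neg haw, if_neg (fun hc : a = w ∧ ¬ gl < gw => haw hc.1),
        if_neg (fun hc : a = l ∧ gw < gl => h2 hc.2)]
      ring

lemma corr_step_getD (cnt : PySem.Dict (String × String) Int) (net : PySem.Dict String Int)
    (s : PySem.Dict String Int) (q : String × String) (a : String) (hne : q.1 ≠ q.2) :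
    (bCorrStep cnt net s q).getD a 0 = s.getD a 0 + corrD cnt net q a := by
  obtain ⟨x, y⟩ := q
  simp only at hne
  unfold bCorrStep corrD fvD
  simp only
  by_cases hd : cnt.getD (x, y) 0 - cnt.getD (y, x) 0 ≠ 0
  · rw [if_pos hd]
    by_cases hpos : cnt.getD (x, y) 0 - cnt.getD (y, x) 0 > 0
    · simp only [if_pos hpos]
      rw [corr_core s x y hne _ _ a]
      split_ifs <;> subst_vars <;> first | omega | simp_all
    · simp only [if_neg hpos]
      rw [corr_core s y x (Ne.symm hne) _ _ a]
      split_ifs <;> subst_vars <;> first | omega | simp_all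
  · rw [if_neg hd]
    push_neg at hd
    split_ifs <;> subst_vars <;> first | omega | simp_all

lemma corr_fold_getD (cnt : PySem.Dict (String × String) Int) (net : PySem.Dict String Int)
    (prs : List (String × String)) (s : PySem.Dict String Int) (a : String)
    (hne : ∀ q ∈ prs, q.1 ≠ q.2) :
    (prs.foldl (bCorrStep cnt net) s).getD a 0
      = s.getD a 0 + (prs.map (fun q => corrD cnt net q a)).sum := by
  induction prs generalizing s with
  | nil => simp
  | cons q t ih =>
    simp only [List.foldl_cons, List.map_cons, List.sum_cons]
    rw [ih _ (fun q' h => hne q' (List.mem_cons_of_mem _ h)),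
      corr_step_getD _ _ _ _ _ (hne q (by simp))]
    ring

-- keys bookkeeping
lemma corr_keys (cnt : PySem.Dict (String × String) Int) (net : PySem.Dict String Int)
    (prs : List (String × String)) (s : PySem.Dict String Int)
    (h : ∀ q ∈ prs, q.1 ∈ s.keys ∧ q.2 ∈ s.keys) :
    (prs.foldl (bCorrStep cnt net) s).keys = s.keys := by
  induction prs generalizing s with
  | nil => rfl
  | cons q t ih =>
    simp only [List.foldl_cons]
    have hq := h q (by simp)
    have hk : (bCorrStep cnt net s q).keys = s.keys := by
      unfold bCorrStep
      simp only
      split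
      · set w := if cnt.getD q 0 - cnt.getD (q.2, q.1) 0 > 0 then q.1 else q.2 with hwdef
        set l := if cnt.getD q 0 - cnt.getD (q.2, q.1) 0 > 0 then q.2 else q.1 with hldef
        have hwk : w ∈ s.keys := by
          rw [hwdef]
          split
          · exact hq.1
          · exact hq.2
        have hlk : l ∈ s.keys := by
          rw [hldef]
          split
          · exact hq.2
          · exact hq.1
        have hs1 : (if ¬ net.getD l 0 < net.getD w 0 then s.insert w (s.getD w 0 + 1) else s).keys = s.keys := by
          split
          · exact PySem.Dict.keys_insert_of_contains _ _ ((PySem.Dict.contains_iff_mem_keys _ _).mpr hwk)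
          · rfl
        split
        · rw [PySem.Dict.keys_insert_of_contains _ _
            ((PySem.Dict.contains_iff_mem_keys _ _).mpr (hs1 ▸ hlk))]
          exact hs1
        · exact hs1
      · rfl
    rw [ih _ (fun q' hq' => by rw [hk]; exact h q' (List.mem_cons_of_mem _ hq')), hk]

-- sum reshaping
lemma sum_single (l : List String) (hnd : l.Nodup) (c : String) (hc : c ∈ l) (f : String → Int) :
    (l.map (fun b => if b = c then f b else 0)).sum = f c := by
  induction l with
  | nil => simp at hc
  | cons x t ih =>
    simp only [List.map_cons, List.sum_cons]
    rcases List.mem_cons.mp hc with h | h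
    · subst h
      rw [if_pos rfl, List.sum_eq_zero, add_zero]
      intro z hz
      obtain ⟨b, hb, hbz⟩ := List.mem_map.mp hz
      rw [← hbz, if_neg (fun e : b = c => (List.nodup_cons.mp hnd).1 (e ▸ hb))]
    · have hx : x ≠ c := fun e => (List.nodup_cons.mp hnd).1 (e ▸ h)
      rw [if_neg hx, ih (List.nodup_cons.mp hnd).2 h, zero_add]

lemma sum_swap {α β : Type} (P : List α) (l : List β) (h : β → α → Int) :
    (P.map (fun q => (l.map (fun b => h b q)).sum)).sum
      = (l.map (fun b => (P.map (fun q => h b q)).sum)).sum := by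
  induction P with
  | nil => simp
  | cons q t ih =>
    simp only [List.map_cons, List.sum_cons, ih]
    rw [← PySem.List.sum_map_add_int]

lemma sum_map_sub {α : Type} (l : List α) (f g : α → Int) :
    (l.map (fun b => f b - g b)).sum = (l.map f).sum - (l.map g).sum := by
  induction l with
  | nil => simp
  | cons x t ih => simp only [List.map_cons, List.sum_cons, ih]; ring

lemma sum_ite_unique (prs : List (String × String))
    (hpw : prs.Pairwise (fun x y => uEqB x y = false)) (r : String × String) (c : Int) :
    (prs.map (fun q => if uEqB q r then c else 0)).sum
      = if ∃ q ∈ prs, uEqB q r = true then c else 0 := by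
  induction prs with
  | nil => simp
  | cons q t ih =>
    obtain ⟨hq, hpt⟩ := List.pairwise_cons.mp hpw
    simp only [List.map_cons, List.sum_cons]
    by_cases h : uEqB q r = true
    · rw [if_pos h, List.sum_eq_zero, add_zero,
        if_pos ⟨q, by simp, h⟩]
      intro z hz
      obtain ⟨q', hq', hqz⟩ := List.mem_map.mp hz
      rw [← hqz, if_neg (fun hu : uEqB q' r = true =>
        (Bool.eq_false_iff.mp (hq q' hq')) (uEqB_trans3 h hu))]
    · rw [if_neg h, ih hpt, zero_add]
      congr 1
      simp only [eq_iff_iff]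
      constructor
      · rintro ⟨q', hq', hu⟩
        exact ⟨q', List.mem_cons_of_mem _ hq', hu⟩
      · rintro ⟨q', hq', hu⟩
        rcases List.mem_cons.mp hq' with he | he
        · exact absurd (he ▸ hu) h
        · exact ⟨q', he, hu⟩

lemma sum_pairs (friends : List String) (hnd : friends.Nodup)
    (prs : List (String × String)) (a : String)
    (hcomp : ∀ q ∈ prs, q.1 ∈ friends ∧ q.2 ∈ friends)
    (hne : ∀ q ∈ prs, q.1 ≠ q.2)
    (hpw : prs.Pairwise (fun x y => uEqB x y = false))
    (f : String → Int)
    (hzero : ∀ b ∈ friends, (∀ q ∈ prs, uEqB q (a, b) = false) → f b = 0) :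
    (prs.map (fun q => if q.1 = a then f q.2 else if q.2 = a then f q.1 else 0)).sum
      = (friends.map f).sum := by
  have stepA : ∀ q ∈ prs, (friends.map (fun b => if uEqB q (a, b) then f b else 0)).sum
      = (if q.1 = a then f q.2 else if q.2 = a then f q.1 else 0) := by
    intro q hq
    obtain ⟨x, y⟩ := q
    have hxy : x ≠ y := hne (x, y) hq
    simp only
    by_cases h1 : x = a
    · subst h1
      have hmc : (friends.map (fun b => if uEqB (x, y) (x, b) then f b else 0))
          = friends.map (fun b => if b = y then f b else 0) := by
        refine List.map_congr_left (fun b _ => ?_)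
        have hiff : (uEqB (x, y) (x, b) = true) ↔ b = y := by
          rw [uEqB_iff]
          constructor
          · rintro (h | h)
            · injection h with h1 h2
              exact h2.symm
            · injection h with h1 h2
              exact absurd h2.symm hxy
          · rintro rfl
            exact Or.inl rfl
        rw [if_congr hiff rfl rfl]
      rw [hmc, sum_single friends hnd y (hcomp (x, y) hq).2 f]
      simp
    · by_cases h2 : y = a
      · subst h2
        have hmc : (friends.map (fun b => if uEqB (x, y) (y, b) then f b else 0))
            = friends.map (fun b => if b = x then f b else 0) := by
          refine List.map_congr_left (fun b _ => ?_)
          have hiff : (uEqB (x, y) (y, b) = true) ↔ b = x := by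
            rw [uEqB_iff]
            constructor
            · rintro (h | h)
              · injection h with h1 h2
                exact absurd h1 hxy
              · injection h with h1 h2
                exact h1.symm
            · rintro rfl
              exact Or.inr rfl
          rw [if_congr hiff rfl rfl]
        rw [hmc, sum_single friends hnd x (hcomp (x, y) hq).1 f]
        simp [h1]
      · have hiff : ∀ b, ¬ (uEqB (x, y) (a, b) = true) := by
          intro b hu
          rcases uEqB_iff.mp hu with h | h
          · exact h1 (congrArg Prod.fst h)
          · exact h2 (congrArg Prod.snd h)
        rw [List.sum_eq_zero, if_neg h1, if_neg h2]
        intro z hz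
        obtain ⟨b, _, hbz⟩ := List.mem_map.mp hz
        rw [← hbz, if_neg (hiff b)]
  have hmc2 : (prs.map (fun q => if q.1 = a then f q.2 else if q.2 = a then f q.1 else 0))
      = prs.map (fun q => (friends.map (fun b => if uEqB q (a, b) then f b else 0)).sum) :=
    List.map_congr_left (fun q hq => (stepA q hq).symm)
  rw [hmc2, sum_swap prs friends (fun b q => if uEqB q (a, b) then f b else 0)]
  have hmc3 : (friends.map (fun b => (prs.map (fun q => if uEqB q (a, b) then f b else 0)).sum))
      = friends.map f := by
    refine List.map_congr_left (fun b hb => ?_)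
    rw [sum_ite_unique prs hpw (a, b) (f b)]
    split
    · rfl
    · rename_i hno
      push_neg at hno
      refine (hzero b hb (fun q hq => ?_)).symm
      exact Bool.eq_false_iff.mpr (hno q hq)
  rw [hmc3]

-- membership of pair components in friends
lemma pairsOf_comp (friends : List String) (gifts : List String)
    (hok : ∀ s ∈ gifts, giftOk friends s = true) :
    ∀ q ∈ pairsOf gifts, q.1 ∈ friends ∧ q.2 ∈ friends := by
  intro q hq
  obtain ⟨s, hs, hps⟩ := List.mem_filterMap.mp hq
  have hg := hok s hs
  unfold giftOk at hg
  unfold parseGift at hps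
  rcases hsp : PySem.Str.split₀ s with _ | ⟨g, tl⟩ <;> rw [hsp] at hg hps
  · simp at hps
  rcases tl with _ | ⟨t, tl2⟩
  · simp at hps
  rcases tl2 with _ | _
  · have : q = (g, t) := by simpa using hps.symm
    subst this
    simp only [Bool.and_eq_true, List.contains_eq_mem, decide_eq_true_eq] at hg
    exact hg
  · simp at hps

-- the all-zero max
lemma max?_zeros (l : List Int) (hne : l ≠ []) (h : ∀ x ∈ l, x = 0) :
    PySem.List.max? l (fun x => x) = some 0 := by
  rcases hm : PySem.List.max? l (fun x => (x : Int)) with _ | m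
  · exact absurd ((PySem.List.max?_eq_none_iff l (fun x => x)).mp hm) hne
  · rw [← h m (PySem.List.max?_mem hm)]

lemma sum_ite_int {α : Type} (l : List α) (p : α → Prop) [DecidablePred p] :
    (l.map (fun x => if p x then (1 : Int) else 0)).sum
      = ((l.countP (fun x => decide (p x))) : Int) := by
  induction l with
  | nil => simp
  | cons x t ih =>
    simp only [List.map_cons, List.sum_cons, List.countP_cons, ih]
    by_cases h : p x <;> simp [h] <;> ring

lemma winN_cond (L : List (String × String)) (a b : String) :
    (decide (cntN L a b > cntN L b a ∨ (cntN L a b = cntN L b a ∧ giN L b < giN L a)))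
      = winN L a b := by
  unfold winN
  by_cases h1 : cntN L a b > cntN L b a
  · simp [h1]
  · by_cases h2 : cntN L a b = cntN L b a
    · by_cases h3 : giN L b < giN L a <;> simp [h1, h2, h3, GT.gt]
    · simp [h1, h2]

-- B reduced to the same one-sided winN count
lemma b_result (friends : List String) (gifts : List String)
    (hnd : friends.Nodup) (hok : ∀ s ∈ gifts, giftOk friends s = true) :
    solution_alt friends gifts
      = match PySem.List.max? (friends.map (fun a =>
          ((friends.countP (fun b => b != a && winN (pairsOf gifts) a b)) : Int))) (fun x => x) with
        | some m => m
        | none => 0 := by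
  have hparse : ∀ s ∈ gifts, (parseGift s).isSome := by
    intro s hs
    have h1 := hok s hs
    unfold giftOk at h1
    unfold parseGift
    rcases hsp : PySem.Str.split₀ s with _ | ⟨g, tl⟩
    · rw [hsp] at h1; simp at h1
    rcases tl with _ | ⟨t, tl2⟩
    · rw [hsp] at h1; simp at h1
    rcases tl2 with _ | _
    · simp
    · rw [hsp] at h1; simp at h1
  rcases hstc : (pairsOf gifts).foldl bPure (PySem.Dict.empty, PySem.Dict.empty, []) with ⟨C, N, P⟩
  -- dictionary-level facts
  have hC : ∀ x y : String, C.getD (x, y) 0 = cntN (pairsOf gifts) x y := by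
    intro x y
    have := congrArg (fun st => st.1) hstc
    simp only at this
    rw [bPure_cnt] at this
    rw [← this, PySem.Dict.getD_foldl_insert_add_one]
    simp [cntN]
  have hN : ∀ x : String, N.getD x 0 = giN (pairsOf gifts) x := by
    intro x
    have := congrArg (fun st => st.2.1) hstc
    simp only at this
    rw [bPure_net] at this
    rw [← this, net_getD]
    simp
  have hPfacts := pairs_inv (pairsOf gifts) PySem.Dict.empty PySem.Dict.empty [] []
    (by intro k; simp [PySem.Dict.keys_empty]) (by simp) (by simp) (by simp)
  rw [hstc] at hPfacts
  simp only [List.nil_append] at hPfacts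
  obtain ⟨hPmem, hPcompl, hPpw⟩ := hPfacts
  have hcompM := pairsOf_comp friends gifts hok
  have hcomp : ∀ q ∈ P, q.1 ∈ friends ∧ q.2 ∈ friends :=
    fun q hq => hcompM q (hPmem q hq).1
  have hneP : ∀ q ∈ P, q.1 ≠ q.2 := fun q hq => (hPmem q hq).2
  -- the per-friend value of the score dictionary
  have hmain : ∀ a ∈ friends,
      ((P.foldl (bCorrStep C N)
        (friends.foldl (fun s x => s.insert x
          (((PySem.List.enumerate (PySem.List.sorted (friends.map (fun a => N.getD a 0)) (fun x => x) false) 0).foldl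
            bRankStep PySem.Dict.empty).getD (N.getD x 0) 0)) PySem.Dict.empty)).getD a 0)
      = ((friends.countP (fun b => b != a && winN (pairsOf gifts) a b)) : Int) := by
    intro a ha
    set gis := PySem.List.sorted (friends.map (fun a => N.getD a 0)) (fun x => x) false with hgis
    set rank := (PySem.List.enumerate gis 0).foldl bRankStep PySem.Dict.empty with hrank
    have hFval : ∀ x ∈ friends, rank.getD (N.getD x 0) 0
        = ((friends.countP (fun b => decide (N.getD b 0 < N.getD x 0))) : Int) := by
      intro x hx
      have hvmem : N.getD x 0 ∈ gis := by
        rw [hgis, PySem.List.mem_sorted]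
        exact List.mem_map_of_mem hx
      have hget := rank_first gis 0 PySem.Dict.empty (N.getD x 0) hvmem (PySem.Dict.get?_empty _)
      have hpair : gis.Pairwise (· ≤ ·) := by
        have := PySem.List.sorted_pairwise (friends.map (fun a => N.getD a 0)) (fun x => x)
        simpa [hgis] using this
      rw [findIdx_sorted gis hpair _ hvmem] at hget
      have hperm : gis.Perm (friends.map (fun a => N.getD a 0)) := by
        rw [hgis]; exact PySem.List.sorted_perm _ _ _
      have hcp : gis.countP (fun z => decide (z < N.getD x 0))
          = friends.countP (fun b => decide (N.getD b 0 < N.getD x 0)) := by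
        rw [hperm.countP_eq, List.countP_map]
        rfl
      rw [PySem.Dict.getD_eq_get?_getD, hrank, hget, hcp]
      simp
    have hsc0 : ∀ x ∈ friends,
        (friends.foldl (fun s x => s.insert x (rank.getD (N.getD x 0) 0)) PySem.Dict.empty).getD x 0
          = rank.getD (N.getD x 0) 0 :=
      fun x hx => ins_fold_getD_mem (fun x => rank.getD (N.getD x 0) 0) friends PySem.Dict.empty x hx
    rw [corr_fold_getD C N P _ a hneP, hsc0 a ha, hFval a ha]
    have hzero : ∀ b ∈ friends, (∀ q ∈ P, uEqB q (a, b) = false) → fvD C N a b = 0 := by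
      intro b hb hnoq
      by_cases hba : b = a
      · subst hba
        unfold fvD
        split_ifs <;> omega
      · have h1 : (a, b) ∉ pairsOf gifts := by
          intro hm
          obtain ⟨q', hq', hu⟩ := hPcompl (a, b) hm (fun he => hba he.symm)
          rw [hnoq q' hq'] at hu
          exact Bool.false_ne_true hu
        have h2 : (b, a) ∉ pairsOf gifts := by
          intro hm
          obtain ⟨q', hq', hu⟩ := hPcompl (b, a) hm hba
          have hu2 : uEqB q' (a, b) = true := uEqB_swap_right.mp hu
          rw [hnoq q' hq'] at hu2
          exact Bool.false_ne_true hu2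
        have hc1 : cntN (pairsOf gifts) a b = 0 := by
          simp [cntN, List.count_eq_zero.mpr h1]
        have hc2 : cntN (pairsOf gifts) b a = 0 := by
          simp [cntN, List.count_eq_zero.mpr h2]
        unfold fvD
        rw [hC a b, hC b a, hc1, hc2]
        split_ifs <;> omega
    have hsum : (P.map (fun q => corrD C N q a)).sum = (friends.map (fvD C N a)).sum := by
      have : (P.map (fun q => corrD C N q a))
          = P.map (fun q => if q.1 = a then fvD C N a q.2 else if q.2 = a then fvD C N a q.1 else 0) := rfl
      rw [this]
      exact sum_pairs friends hnd P a hcomp hneP hPpw (fvD C N a) hzero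
    rw [hsum]
    have hsplit : (friends.map (fvD C N a)).sum
        = (friends.map (fun b => if C.getD (a, b) 0 > C.getD (b, a) 0
              ∨ (C.getD (a, b) 0 = C.getD (b, a) 0 ∧ N.getD b 0 < N.getD a 0) then (1 : Int) else 0)).sum
          - (friends.map (fun b => if N.getD b 0 < N.getD a 0 then (1 : Int) else 0)).sum := by
      rw [← sum_map_sub]
      rfl
    rw [hsplit, sum_ite_int, sum_ite_int]
    have hcong : (friends.countP (fun b => decide (C.getD (a, b) 0 > C.getD (b, a) 0
          ∨ (C.getD (a, b) 0 = C.getD (b, a) 0 ∧ N.getD b 0 < N.getD a 0))))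
        = friends.countP (fun b => b != a && winN (pairsOf gifts) a b) := by
      refine List.countP_congr (fun b hb => ?_)
      rw [hC a b, hC b a, hN a, hN b]
      by_cases hba : b = a
      · subst hba
        simp
      · have hbne : (b != a) = true := by simp [bne_iff_ne, hba]
        rw [hbne, Bool.true_and, winN_cond]
    rw [hcong]
    ring
  -- reduce the port to its components and compare the value lists
  have hkeys0 : (friends.foldl (fun s x => s.insert x
      (((PySem.List.enumerate (PySem.List.sorted (friends.map (fun a => N.getD a 0)) (fun x => x) false) 0).foldl
        bRankStep PySem.Dict.empty).getD (N.getD x 0) 0)) PySem.Dict.empty).keys = friends := by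
    rw [PySem.Dict.keys_foldl_insert]
    rw [PySem.Dict.keys_empty, PySem.Set.update_nil_left, PySem.Set.ofList_eq_self_of_nodup _ hnd]
  have hkeysF : ((P.foldl (bCorrStep C N)
      (friends.foldl (fun s x => s.insert x
        (((PySem.List.enumerate (PySem.List.sorted (friends.map (fun a => N.getD a 0)) (fun x => x) false) 0).foldl
          bRankStep PySem.Dict.empty).getD (N.getD x 0) 0)) PySem.Dict.empty))).keys = friends := by
    rw [corr_keys C N P _ (fun q hq => by
      rw [hkeys0]
      exact hcomp q hq), hkeys0]
  have hvals : ((P.foldl (bCorrStep C N)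
      (friends.foldl (fun s x => s.insert x
        (((PySem.List.enumerate (PySem.List.sorted (friends.map (fun a => N.getD a 0)) (fun x => x) false) 0).foldl
          bRankStep PySem.Dict.empty).getD (N.getD x 0) 0)) PySem.Dict.empty))).values
      = friends.map (fun a =>
          ((friends.countP (fun b => b != a && winN (pairsOf gifts) a b)) : Int)) := by
    rw [PySem.Dict.values_eq_map_keys _ (hkeysF.symm ▸ hnd) 0, hkeysF]
    exact List.map_congr_left (fun a ha => hmain a ha)
  simp only [solution_alt]
  rw [b_loop gifts hparse _, hstc]
  simp only []
  rw [hvals]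

-- empty-gifts case (duplicate friend names allowed): both programs return 0
lemma a_empty (friends : List String) (hne : friends ≠ []) : solution friends [] = 0 := by
  simp only [solution, List.foldl_nil]
  have hzero : ∀ j : Nat, j < friends.length →
      ((PySem.List.pyRange 0 (friends.length : Int) 1).map (fun _ => (0 : Int))).getD j 0 = 0 := by
    intro j hj
    rw [List.getD_eq_getElem _ _ (by simp [PySem.List.length_pyRange_one]; omega)]
    simp
  have htb0len : ((PySem.List.pyRange 0 (friends.length : Int) 1).map (fun _ =>
      (PySem.List.pyRange 0 (friends.length : Int) 1).map (fun _ => (0 : Int)))).length = friends.length := by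
    simp [PySem.List.length_pyRange_one]
  have hrow0 : ∀ i : Nat, i < friends.length →
      (((PySem.List.pyRange 0 (friends.length : Int) 1).map (fun _ =>
        (PySem.List.pyRange 0 (friends.length : Int) 1).map (fun _ => (0 : Int)))).getD i [])
      = (PySem.List.pyRange 0 (friends.length : Int) 1).map (fun _ => (0 : Int)) := by
    intro i hi
    rw [List.getD_eq_getElem _ _ (by rw [htb0len]; exact hi)]
    simp
  have hGIl0 : (PySem.List.pyRange 0 (friends.length : Int) 1).map (fun i =>
      (((PySem.List.pyRange 0 (friends.length : Int) 1).foldl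
          (fun d i => d.insert i ((0:Int),(0:Int))) PySem.Dict.empty).getD i ((0 : Int), (0 : Int))).1
        - (((PySem.List.pyRange 0 (friends.length : Int) 1).foldl
          (fun d i => d.insert i ((0:Int),(0:Int))) PySem.Dict.empty).getD i ((0 : Int), (0 : Int))).2)
      = (PySem.List.pyRange 0 (friends.length : Int) 1).map (fun _ => (0 : Int)) := by
    refine List.map_congr_left (fun i _ => ?_)
    rw [ix0_getD _ _ (fun k' => by simp) i]
    simp
  rw [hGIl0]
  set zeros := (PySem.List.pyRange 0 (friends.length : Int) 1).map (fun _ => (0 : Int)) with hzeros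
  set TB0 := (PySem.List.pyRange 0 (friends.length : Int) 1).map (fun _ =>
      (PySem.List.pyRange 0 (friends.length : Int) 1).map (fun _ => (0 : Int))) with hTB0
  set pairsL := (PySem.List.pyRange 0 (friends.length : Int) 1).flatMap (fun i =>
      (PySem.List.pyRange i (friends.length : Int) 1).map (fun j => (i, j))) with hpairs
  have hzl : zeros.length = friends.length := by
    rw [hzeros]; simp [PySem.List.length_pyRange_one]
  have hflat : pairsL.foldl (fun nm p => aPair TB0 zeros p.1 nm p.2) zeros
      = (PySem.List.pyRange 0 (friends.length : Int) 1).foldl (fun nm i =>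
          (PySem.List.pyRange i (friends.length : Int) 1).foldl (aPair TB0 zeros i) nm) zeros := by
    rw [hpairs, List.foldl_flatMap]
    simp only [List.foldl_map]
  have hget0 : ∀ a : Int, 0 ≤ a → a < (friends.length : Int) →
      PySem.List.pyGetD zeros a 0 = 0 := by
    intro a ha haN
    rw [show a = ((a.toNat : Nat) : Int) from (Int.toNat_of_nonneg ha).symm,
      PySem.List.pyGetD_natCast, hzeros]
    exact hzero a.toNat (by omega)
  have hT0 : ∀ a b : Int, 0 ≤ a → a < (friends.length : Int) → 0 ≤ b → b < (friends.length : Int) →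
      PySem.List.pyGetD (PySem.List.pyGetD TB0 a []) b 0 = 0 := by
    intro a b ha haN hb hbN
    rw [show a = ((a.toNat : Nat) : Int) from (Int.toNat_of_nonneg ha).symm,
      show b = ((b.toNat : Nat) : Int) from (Int.toNat_of_nonneg hb).symm,
      PySem.List.pyGetD_natCast, PySem.List.pyGetD_natCast, hTB0, hrow0 a.toNat (by omega)]
    exact hzero b.toNat (by omega)
  have hnone : ∀ p ∈ pairsL, tgtF TB0 zeros p = none := by
    intro p hp
    rw [hpairs] at hp
    obtain ⟨i, hi, hpm⟩ := List.mem_flatMap.mp hp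
    obtain ⟨j, hj, rfl⟩ := List.mem_map.mp hpm
    have hib := PySem.List.mem_pyRange_one.mp hi
    have hjb := PySem.List.mem_pyRange_one.mp hj
    rw [tgtF_eq]
    have hwf : ∀ a b : Int, 0 ≤ a → a < (friends.length : Int) → 0 ≤ b → b < (friends.length : Int) →
        winT TB0 zeros a b = false := by
      intro a b ha haN hb hbN
      simp [winT, hT0 a b ha haN hb hbN, hT0 b a hb hbN ha haN,
        hget0 a ha haN, hget0 b hb hbN]
    rw [hwf i j (by omega) (by omega) (by omega) (by omega),
      hwf j i (by omega) (by omega) (by omega) (by omega)]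
    simp
  obtain ⟨hNMlen, hNMent⟩ := bump_loop pairsL (tgtF TB0 zeros) (fun nm p => aPair TB0 zeros p.1 nm p.2)
      (fun nm p => aPair_match TB0 zeros nm p) zeros
      (fun p hp t ht => absurd ht (by rw [hnone p hp]; simp))
  rw [← hflat]
  have hlen : (pairsL.foldl (fun nm p => aPair TB0 zeros p.1 nm p.2) zeros).length = friends.length := by
    rw [hNMlen, hzl]
  have hnil : pairsL.foldl (fun nm p => aPair TB0 zeros p.1 nm p.2) zeros ≠ [] := by
    intro h0
    rw [h0] at hlen
    exact hne (by simpa using hlen.symm)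
  have hallz : ∀ x ∈ pairsL.foldl (fun nm p => aPair TB0 zeros p.1 nm p.2) zeros, x = 0 := by
    intro x hx
    obtain ⟨k, hk, hkx⟩ := List.mem_iff_getElem.mp hx
    have hkz : k < zeros.length := by rw [← hNMlen]; exact hk
    have hent := hNMent k hkz
    have hc0 : pairsL.countP (fun p => tgtF TB0 zeros p == some (k : Int)) = 0 :=
      List.countP_eq_zero.mpr (fun p hp => by rw [hnone p hp]; simp)
    rw [hc0, hzero k (by rw [hzl] at hkz; exact hkz)] at hent
    rw [← hkx, ← List.getD_eq_getElem _ 0 hk, hent]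
    simp
  rw [max?_zeros _ hnil hallz]

lemma b_empty (friends : List String) (hne : friends ≠ []) : solution_alt friends [] = 0 := by
  simp only [solution_alt, List.foldl_nil, PySem.Dict.getD_empty]
  set gis := PySem.List.sorted (friends.map (fun _ => (0 : Int))) (fun x => x) false with hgis
  set rank := (PySem.List.enumerate gis 0).foldl bRankStep PySem.Dict.empty with hrank
  have h0mem : (0 : Int) ∈ gis := by
    rw [hgis, PySem.List.mem_sorted]
    rcases friends with _ | ⟨f, fs⟩
    · exact absurd rfl hne
    · simp
  have hpair : gis.Pairwise (· ≤ ·) := by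
    have := PySem.List.sorted_pairwise (friends.map (fun _ => (0 : Int))) (fun x => x)
    simpa [hgis] using this
  have hget := rank_first gis 0 PySem.Dict.empty 0 h0mem (PySem.Dict.get?_empty _)
  rw [findIdx_sorted gis hpair _ h0mem] at hget
  have hcnt0 : gis.countP (fun x => decide (x < 0)) = 0 :=
    List.countP_eq_zero.mpr (fun x hx => by
      rw [hgis, PySem.List.mem_sorted] at hx
      obtain ⟨_, _, rfl⟩ := List.mem_map.mp hx
      simp)
  have hrank0 : rank.getD (0 : Int) 0 = 0 := by
    rw [PySem.Dict.getD_eq_get?_getD, hrank, hget, hcnt0]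
    simp
  rw [hrank0]
  have hkeys : (friends.foldl (fun s a => s.insert a (0 : Int)) PySem.Dict.empty).keys
      = PySem.Set.ofList friends := by
    rw [PySem.Dict.keys_foldl_insert, PySem.Dict.keys_empty, PySem.Set.update_nil_left]
  have hndk : (friends.foldl (fun s a => s.insert a (0 : Int)) PySem.Dict.empty).keys.Nodup := by
    rw [hkeys]; exact PySem.Set.nodup_ofList friends
  have hvals : (friends.foldl (fun s a => s.insert a (0 : Int)) PySem.Dict.empty).values
      = (PySem.Set.ofList friends).map (fun k =>
          (friends.foldl (fun s a => s.insert a (0 : Int)) PySem.Dict.empty).getD k 0) := by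
    rw [PySem.Dict.values_eq_map_keys _ hndk 0, hkeys]
  have hallz : ∀ x ∈ (friends.foldl (fun s a => s.insert a (0 : Int)) PySem.Dict.empty).values, x = 0 := by
    intro x hx
    rw [hvals] at hx
    obtain ⟨k, hk, rfl⟩ := List.mem_map.mp hx
    have hkf : k ∈ friends := by simpa [PySem.Set.mem_ofList] using hk
    exact ins_fold_getD_mem (fun _ => (0 : Int)) friends PySem.Dict.empty k hkf
  have hnil : (friends.foldl (fun s a => s.insert a (0 : Int)) PySem.Dict.empty).values ≠ [] := by
    rw [hvals]
    rcases friends with _ | ⟨f, fs⟩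
    · exact absurd rfl hne
    · intro hcontra
      have hm : f ∈ PySem.Set.ofList (f :: fs) := by simp [PySem.Set.mem_ofList]
      rw [List.map_eq_nil_iff.mp hcontra] at hm
      simp at hm
  rw [max?_zeros _ hnil hallz]

-- ===== VERDICT (by name: the statement is the Claim_ definition above) =====
theorem solution_spec : Claim_equal_solution := by
  intro friends gifts _ hpre
  obtain ⟨hne, hnd_or, hok⟩ := hpre
  unfold Spec_solution
  rcases hnd_or with hnd | hg
  · rw [a_result friends gifts hnd hok, b_result friends gifts hnd hok]
  · subst hg
    rw [a_empty friends hne, b_empty friends hne]
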